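-- pv_equiv track=rewrite | github.com/Naerriel/popular-words | src/words/frequencies.py | filter_out_words_in_single_book
-- ===== SOURCE A (Python) =====
-- def filter_out_words_in_single_book(words_occurences_per_books):
--     all_books_words_count = {}
--
--     for words_occurences in words_occurences_per_books:
--         for word in words_occurences:
--             if word[0] in all_books_words_count:
--                 all_books_words_count[word[0]] += word[1]
--             else:
--                 all_books_words_count[word[0]] = word[1]
--
--     words_to_skip = {}
--
--     for words_occurences in words_occurences_per_books:
--         count_per_book = {}
--         for word in words_occurences:
--             if word[0] in count_per_book:
--                 count_per_book[word[0]] += word[1]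
--             else:
--                 count_per_book[word[0]] = word[1]
--
--         for wordTxt in count_per_book:
--             isWordInSingleBook = count_per_book[
--                 wordTxt] == all_books_words_count[wordTxt]
--             if isWordInSingleBook:
--                 words_to_skip[wordTxt] = True
--
--     def get_filtered_words_occurences(words_occurences):
--         result = []
--         for word in words_occurences:
--             if not word[0] in words_to_skip:
--                 result.append(word)
--         return result
--
--     return [
--         get_filtered_words_occurences(words_occurences)
--         for words_occurences in words_occurences_per_books
--     ]
-- ===== SOURCE B (Python) =====
-- def filter_out_words_in_single_book(words_occurences_per_books):
--     # One pass: word -> {book_index: summed count}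
--     per_word = {}
--     for i, book in enumerate(words_occurences_per_books):
--         for w, c in book:
--             d = per_word.setdefault(w, {})
--             d[i] = d.get(i, 0) + c
--     skip = {w for w, d in per_word.items() if sum(d.values()) in d.values()}
--     return [[entry for entry in book if entry[0] not in skip]
--             for book in words_occurences_per_books]
-- ===== Notes on version B (the rewrite author's own statement) =====
-- stated objective: alternative
-- what changed: A builds a global count dict, then re-builds a per-book count dict for every book and marks words whose per-book sum equals the global sum in a second full pass; B makes a single indexed pass building one map word -> {book index: summed count}, derives each word's global total as the sum of its per-book values, and skips a word iff that total occurs among its per-book sums.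
import Mathlib
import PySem

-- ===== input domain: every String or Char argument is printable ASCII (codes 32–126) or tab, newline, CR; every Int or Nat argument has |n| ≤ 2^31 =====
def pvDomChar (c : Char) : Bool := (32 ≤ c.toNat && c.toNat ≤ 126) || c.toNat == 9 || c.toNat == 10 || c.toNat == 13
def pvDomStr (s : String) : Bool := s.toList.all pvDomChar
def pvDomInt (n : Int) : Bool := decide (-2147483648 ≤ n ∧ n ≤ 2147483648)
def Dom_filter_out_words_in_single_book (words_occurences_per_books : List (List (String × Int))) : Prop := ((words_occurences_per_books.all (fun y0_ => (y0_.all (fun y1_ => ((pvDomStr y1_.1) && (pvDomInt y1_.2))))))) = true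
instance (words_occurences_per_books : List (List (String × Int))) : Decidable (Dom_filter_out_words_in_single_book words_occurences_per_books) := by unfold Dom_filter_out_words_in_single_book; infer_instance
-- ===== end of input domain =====

-- B replaces A's three separate dict-building passes by one indexed pass building
-- word -> (book index -> summed count) and the test "global total ∈ per-book sums"; objective: alternative decomposition.

-- ===== PORT A =====
-- The `match d.get?` is exactly Python's `in`-test + lookup/assignment; `getD _ 0` is used only
-- where the key is guaranteed present (count_per_book keys ⊆ all_books_words_count keys), so it never defaults.
def filter_out_words_in_single_book (words_occurences_per_books : List (List (String × Int))) : List (List (String × Int)) :=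
  let all_books_words_count : PySem.Dict String Int := words_occurences_per_books.foldl (fun d occ =>
      occ.foldl (fun d word =>
        match d.get? word.1 with
        | some v => d.insert word.1 (v + word.2)
        | none => d.insert word.1 word.2) d)
    PySem.Dict.empty
  let words_to_skip : PySem.Dict String Bool := words_occurences_per_books.foldl (fun skip occ =>
      let count_per_book : PySem.Dict String Int := occ.foldl (fun d word =>
        match d.get? word.1 with
        | some v => d.insert word.1 (v + word.2)
        | none => d.insert word.1 word.2) PySem.Dict.empty
      count_per_book.keys.foldl (fun skip wordTxt =>
        if count_per_book.getD wordTxt 0 == all_books_words_count.getD wordTxt 0 then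
          skip.insert wordTxt true
        else skip) skip)
    PySem.Dict.empty
  words_occurences_per_books.map (fun occ =>
    occ.foldl (fun result word =>
      if !(words_to_skip.contains word.1) then result ++ [word] else result) [])

-- ===== PORT B =====
-- `setdefault(w, {})` followed by in-place `d[i] = …` is `insert w (updated inner dict)`:
-- overwrite keeps the position, a new key appends — exactly Python's dict behaviour.
def filter_out_words_in_single_book_alt (words_occurences_per_books : List (List (String × Int))) : List (List (String × Int)) :=
  let per_word : PySem.Dict String (PySem.Dict Int Int) :=
    (PySem.List.enumerate words_occurences_per_books).foldl (fun pw p =>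
      p.2.foldl (fun pw e =>
        let d := pw.getD e.1 PySem.Dict.empty
        pw.insert e.1 (d.insert p.1 (d.getD p.1 0 + e.2))) pw)
      PySem.Dict.empty
  let skip : PySem.Set String :=
    PySem.Set.ofList ((per_word.items.filter (fun p => p.2.values.contains p.2.values.sum)).map (·.1))
  words_occurences_per_books.map (fun book => book.filter (fun e => !(skip.contains e.1)))


-- ===== PRECONDITION & SPEC =====
def Spec_filter_out_words_in_single_book (words_occurences_per_books : List (List (String × Int))) (out : List (List (String × Int))) : Prop := out = filter_out_words_in_single_book_alt words_occurences_per_books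
instance (words_occurences_per_books : List (List (String × Int))) (out : List (List (String × Int))) : Decidable (Spec_filter_out_words_in_single_book words_occurences_per_books out) := by unfold Spec_filter_out_words_in_single_book; infer_instance

-- ===== CLAIM (what is proved, stated in full; the proofs are below) =====
def Claim_equal_filter_out_words_in_single_book : Prop := ∀ (words_occurences_per_books : List (List (String × Int))), Dom_filter_out_words_in_single_book words_occurences_per_books → Spec_filter_out_words_in_single_book words_occurences_per_books (filter_out_words_in_single_book words_occurences_per_books)

-- ===== LEMMAS AND PROOFS =====

def occB (w : String) (occ : List (String × Int)) : Bool := occ.any (fun e => e.1 == w)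
def bSum (w : String) (occ : List (String × Int)) : Int := ((occ.filter (fun e => e.1 == w)).map (·.2)).sum

def stepA (d : PySem.Dict String Int) (word : String × Int) : PySem.Dict String Int :=
  match d.get? word.1 with
  | some v => d.insert word.1 (v + word.2)
  | none => d.insert word.1 word.2

theorem stepA_eq (d : PySem.Dict String Int) (word : String × Int) :
    stepA d word = d.insert word.1 (d.getD word.1 0 + word.2) := by
  unfold stepA
  cases h : d.get? word.1 with
  | some v => rw [PySem.Dict.getD_of_get?_eq_some (h := h)]
  | none => rw [PySem.Dict.getD_of_get?_eq_none (h := h)]; simp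

theorem bSum_cons (w : String) (e : String × Int) (t : List (String × Int)) :
    bSum w (e :: t) = (if e.1 = w then e.2 else 0) + bSum w t := by
  simp [bSum, List.filter_cons]
  split_ifs with h <;> simp_all

theorem bSum_of_not_occ (w : String) (occ : List (String × Int)) (h : occB w occ = false) :
    bSum w occ = 0 := by
  induction occ with
  | nil => rfl
  | cons e t ih =>
    simp [occB, List.any_cons] at h
    rw [bSum_cons, ih (by simp [occB, List.any_eq_false]; exact fun a b hab => h.2 a b hab), if_neg h.1]
    simp

theorem foldA_getD (occ : List (String × Int)) (d : PySem.Dict String Int) (w : String) :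
    (occ.foldl stepA d).getD w 0 = d.getD w 0 + bSum w occ := by
  induction occ generalizing d with
  | nil => simp [bSum]
  | cons e t ih =>
    rw [List.foldl_cons, ih, stepA_eq, bSum_cons, PySem.Dict.getD_insert]
    by_cases h : w = e.1
    · rw [if_pos h, if_pos h.symm, h]; ring
    · rw [if_neg h, if_neg (fun hh => h hh.symm)]; ring

theorem foldA_contains (occ : List (String × Int)) (d : PySem.Dict String Int) (w : String) :
    (occ.foldl stepA d).contains w = (d.contains w || occB w occ) := by
  induction occ generalizing d with
  | nil => simp [occB]
  | cons e t ih =>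
    rw [List.foldl_cons, ih, stepA_eq, PySem.Dict.contains_insert]
    have ht : occB w (e :: t) = (e.1 == w || occB w t) := by simp [occB, List.any_cons]
    rw [ht]
    by_cases h : e.1 = w
    · simp [h]
    · have h1 : (e.1 == w) = false := by simp [h]
      have h2 : (w == e.1) = false := by simp; exact fun hh => h hh.symm
      rw [h1, h2]; cases d.contains w <;> simp

-- === A side ===
def allcD (books : List (List (String × Int))) : PySem.Dict String Int :=
  books.foldl (fun d occ => occ.foldl stepA d) PySem.Dict.empty

theorem allcD_getD (books : List (List (String × Int))) (w : String) :
    (allcD books).getD w 0 = bSum w books.flatten := by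
  rw [allcD, ← List.foldl_flatten, foldA_getD]
  simp

theorem bSum_flatten (w : String) (books : List (List (String × Int))) :
    bSum w books.flatten = (books.map (fun occ => bSum w occ)).sum := by
  induction books with
  | nil => rfl
  | cons b t ih =>
    rw [List.flatten_cons, List.map_cons, List.sum_cons, ← ih]
    simp [bSum, List.filter_append]

theorem skipFold_contains (ks : List String) (skip : PySem.Dict String Bool) (f : String → Bool) (w : String) :
    (ks.foldl (fun s k => if f k then s.insert k true else s) skip).contains w
      = (skip.contains w || (ks.contains w && f w)) := by
  induction ks generalizing skip with
  | nil => simp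
  | cons k t ih =>
    rw [List.foldl_cons, ih]
    by_cases hk : k = w
    · subst hk
      by_cases hf : f k
      · simp [hf]
      · simp [hf]
    · have h1 : (k == w) = false := by simp [hk]
      have h3 : decide (w = k) = false := by simp; exact fun hh => hk hh.symm
      by_cases hf : f k
      · rw [if_pos hf, PySem.Dict.contains_insert]
        have h2 : (w == k) = false := by simp; exact fun hh => hk hh.symm
        rw [h2]
        simp [h3]
      · rw [if_neg hf]
        simp [h3]

def P (books : List (List (String × Int))) (w : String) : Prop :=
  ∃ occ ∈ books, occB w occ = true ∧ bSum w occ = bSum w books.flatten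

def skipAD (books : List (List (String × Int))) : PySem.Dict String Bool :=
  books.foldl (fun skip occ =>
    (occ.foldl stepA PySem.Dict.empty).keys.foldl (fun skip k =>
      if (occ.foldl stepA PySem.Dict.empty).getD k 0 == (allcD books).getD k 0 then skip.insert k true
      else skip) skip) PySem.Dict.empty

theorem keys_cpb_contains (occ : List (String × Int)) (w : String) :
    ((occ.foldl stepA PySem.Dict.empty).keys).contains w = occB w occ := by
  have h1 : (occ.foldl stepA PySem.Dict.empty).contains w = occB w occ := by
    rw [foldA_contains]; simp
  rw [← h1]
  rw [PySem.Dict.contains_eq_decide_mem_keys]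
  simp

theorem cpb_getD (occ : List (String × Int)) (w : String) :
    (occ.foldl stepA PySem.Dict.empty).getD w 0 = bSum w occ := by
  rw [foldA_getD]; simp

theorem skipAD_contains (books : List (List (String × Int))) (w : String) :
    (skipAD books).contains w
      = books.any (fun occ => occB w occ && (bSum w occ == bSum w books.flatten)) := by
  rw [skipAD]
  have main : ∀ (l : List (List (String × Int))) (skip : PySem.Dict String Bool),
      (l.foldl (fun skip occ =>
        (occ.foldl stepA PySem.Dict.empty).keys.foldl (fun skip k =>
          if (occ.foldl stepA PySem.Dict.empty).getD k 0 == (allcD books).getD k 0 then skip.insert k true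
          else skip) skip) skip).contains w
      = (skip.contains w || l.any (fun occ => occB w occ && (bSum w occ == (allcD books).getD w 0))) := by
    intro l
    induction l with
    | nil => simp
    | cons occ t ih =>
      intro skip
      rw [List.foldl_cons, ih, skipFold_contains, keys_cpb_contains, cpb_getD]
      simp [List.any_cons, Bool.or_assoc]
  rw [main, allcD_getD]
  simp

-- === B side ===
def stepB (i : Int) (pw : PySem.Dict String (PySem.Dict Int Int)) (e : String × Int) :
    PySem.Dict String (PySem.Dict Int Int) :=
  let d := pw.getD e.1 PySem.Dict.empty
  pw.insert e.1 (d.insert i (d.getD i 0 + e.2))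

theorem foldB_getD (i : Int) (occ : List (String × Int)) (pw : PySem.Dict String (PySem.Dict Int Int)) (w : String) :
    (occ.foldl (stepB i) pw).getD w PySem.Dict.empty
      = if occB w occ then
          (pw.getD w PySem.Dict.empty).insert i ((pw.getD w PySem.Dict.empty).getD i 0 + bSum w occ)
        else pw.getD w PySem.Dict.empty := by
  induction occ generalizing pw with
  | nil => simp [occB]
  | cons e t ih =>
    rw [List.foldl_cons, ih]
    have hocc : occB w (e :: t) = (e.1 == w || occB w t) := by simp [occB, List.any_cons]
    by_cases he : e.1 = w
    · have hg : (stepB i pw e).getD w PySem.Dict.empty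
          = (pw.getD w PySem.Dict.empty).insert i ((pw.getD w PySem.Dict.empty).getD i 0 + e.2) := by
        rw [stepB, he]; exact PySem.Dict.getD_insert_self _ _ _ _
      rw [hg, hocc]
      by_cases ht : occB w t
      · rw [if_pos ht, if_pos (show (e.1 == w || occB w t) = true by simp [he]),
            PySem.Dict.insert_insert_self, PySem.Dict.getD_insert_self, bSum_cons, if_pos he]
        ring_nf
      · rw [if_neg (by simp [ht]), if_pos (show (e.1 == w || occB w t) = true by simp [he]),
            bSum_cons, if_pos he, bSum_of_not_occ w t (by simpa using ht)]
        simp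
    · have hg : (stepB i pw e).getD w PySem.Dict.empty = pw.getD w PySem.Dict.empty := by
        rw [stepB]; exact PySem.Dict.getD_insert_of_ne _ _ _ (fun hh => he hh.symm)
      rw [hg, hocc]
      have : bSum w (e :: t) = bSum w t := by rw [bSum_cons, if_neg he]; ring
      simp [he, this]

theorem foldB_contains (i : Int) (occ : List (String × Int)) (pw : PySem.Dict String (PySem.Dict Int Int)) (w : String) :
    (occ.foldl (stepB i) pw).contains w = (pw.contains w || occB w occ) := by
  induction occ generalizing pw with
  | nil => simp [occB]
  | cons e t ih =>
    rw [List.foldl_cons, ih]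
    have hs : (stepB i pw e).contains w = ((w == e.1) || pw.contains w) := by
      rw [stepB]; exact PySem.Dict.contains_insert _ _ _ _
    rw [hs]
    have hocc : occB w (e :: t) = (e.1 == w || occB w t) := by simp [occB, List.any_cons]
    rw [hocc]
    by_cases he : e.1 = w
    · simp [he]
    · have h1 : (e.1 == w) = false := by simp [he]
      have h2 : (w == e.1) = false := by simp; exact fun hh => he hh.symm
      rw [h1, h2]; simp

-- outer fold of B: items of the inner dict for word w
theorem foldB_outer_items (l : List (Int × List (String × Int))) (pw : PySem.Dict String (PySem.Dict Int Int)) (w : String)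
    (hnd : (l.map (·.1)).Nodup)
    (hfresh : ∀ p ∈ l, ((pw.getD w PySem.Dict.empty).contains p.1) = false) :
    ((l.foldl (fun pw p => p.2.foldl (stepB p.1) pw) pw).getD w PySem.Dict.empty).items
      = (pw.getD w PySem.Dict.empty).items
        ++ (l.filter (fun p => occB w p.2)).map (fun p => (p.1, bSum w p.2)) := by
  induction l generalizing pw with
  | nil => simp
  | cons q t ih =>
    rw [List.foldl_cons]
    rw [List.map_cons] at hnd
    have hnd1 := List.nodup_cons.mp hnd
    have hq := foldB_getD q.1 q.2 pw w
    by_cases ho : occB w q.2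
    · rw [List.filter_cons, if_pos (by simpa using ho), List.map_cons]
      have hfq : (pw.getD w PySem.Dict.empty).contains q.1 = false := hfresh q (by simp)
      have hd0 : (pw.getD w PySem.Dict.empty).getD q.1 0 = 0 :=
        PySem.Dict.getD_of_not_contains _ _ hfq
      have hitems : ((q.2.foldl (stepB q.1) pw).getD w PySem.Dict.empty).items
          = (pw.getD w PySem.Dict.empty).items ++ [(q.1, bSum w q.2)] := by
        rw [hq, if_pos ho, hd0, zero_add]
        exact PySem.Dict.items_insert_of_not_contains _ _ hfq
      rw [ih _ hnd1.2]
      · rw [hitems, List.append_assoc]; rfl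
      · intro p hp
        rw [hq, if_pos ho, PySem.Dict.contains_insert]
        have hne : (p.1 == q.1) = false := by
          simp only [beq_eq_false_iff_ne, ne_eq]
          intro hh
          exact hnd1.1 (hh ▸ (List.mem_map_of_mem hp : p.1 ∈ t.map (·.1)))
        rw [hne, Bool.false_or]
        exact hfresh p (by simp [hp])
    · rw [List.filter_cons, if_neg (by simpa using ho), ih _ hnd1.2]
      · rw [hq, if_neg ho]
      · intro p hp; rw [hq, if_neg ho]; exact hfresh p (by simp [hp])

def perWordD (books : List (List (String × Int))) : PySem.Dict String (PySem.Dict Int Int) :=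
  (PySem.List.enumerate books).foldl (fun pw p => p.2.foldl (stepB p.1) pw) PySem.Dict.empty

def skipBD (books : List (List (String × Int))) : List String :=
  PySem.Set.ofList (((perWordD books).items.filter (fun p => p.2.values.contains p.2.values.sum)).map (·.1))

theorem enum_fst_nodup (books : List (List (String × Int))) :
    ((PySem.List.enumerate books 0).map (·.1)).Nodup := by
  have h := PySem.List.pairwise_lt_enumerate books 0
  have h2 : ((PySem.List.enumerate books 0).map (·.1)).Pairwise (· < ·) :=
    List.pairwise_map.mpr h
  exact h2.imp (fun hlt => ne_of_lt hlt)

theorem perWordD_getD_items (books : List (List (String × Int))) (w : String) :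
    ((perWordD books).getD w PySem.Dict.empty).items
      = ((PySem.List.enumerate books 0).filter (fun p => occB w p.2)).map (fun p => (p.1, bSum w p.2)) := by
  rw [perWordD]
  rw [foldB_outer_items _ _ _ (enum_fst_nodup books) (by intro p _; simp)]
  rw [PySem.Dict.getD_empty]
  rfl

theorem perWordD_contains (books : List (List (String × Int))) (w : String) :
    (perWordD books).contains w = books.any (fun occ => occB w occ) := by
  rw [perWordD]
  have main : ∀ (l : List (Int × List (String × Int))) (pw : PySem.Dict String (PySem.Dict Int Int)),
      (l.foldl (fun pw p => p.2.foldl (stepB p.1) pw) pw).contains w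
        = (pw.contains w || l.any (fun p => occB w p.2)) := by
    intro l
    induction l with
    | nil => simp
    | cons q t ih =>
      intro pw
      rw [List.foldl_cons, ih, foldB_contains]
      simp [List.any_cons, Bool.or_assoc]
  rw [main]
  have : books.any (fun occ => occB w occ)
      = (PySem.List.enumerate books 0).any (fun p => occB w p.2) := by
    conv_lhs => rw [← PySem.List.map_snd_enumerate books 0]
    rw [List.any_map]
    rfl
  rw [this]
  simp

theorem perWordD_nodup_keys (books : List (List (String × Int))) :
    (perWordD books).keys.Nodup := by
  rw [perWordD]
  have main : ∀ (l : List (Int × List (String × Int))) (pw : PySem.Dict String (PySem.Dict Int Int)),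
      pw.keys.Nodup → (l.foldl (fun pw p => p.2.foldl (stepB p.1) pw) pw).keys.Nodup := by
    intro l
    induction l with
    | nil => intro pw h; simpa using h
    | cons q t ih =>
      intro pw h
      rw [List.foldl_cons]
      apply ih
      have : q.2.foldl (stepB q.1) pw
          = q.2.foldl (fun d x => d.insert x.1 ((d.getD x.1 PySem.Dict.empty).insert q.1 ((d.getD x.1 PySem.Dict.empty).getD q.1 0 + x.2))) pw := rfl
      rw [this]
      exact PySem.Dict.nodup_keys_foldl_insert_key _ (fun x : String × Int => x.1) _ _ h
  exact main _ _ (by simp)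

-- sums over a filtered list where the dropped elements contribute 0
theorem sum_map_filter_eq {α : Type} (l : List α) (p : α → Bool) (f : α → Int)
    (h : ∀ x ∈ l, p x = false → f x = 0) :
    ((l.filter p).map f).sum = (l.map f).sum := by
  induction l with
  | nil => rfl
  | cons x t ih =>
    rw [List.filter_cons]
    by_cases hx : p x
    · rw [if_pos (by simpa using hx)]
      simp only [List.map_cons, List.sum_cons]
      rw [ih (fun y hy hpy => h y (by simp [hy]) hpy)]
    · rw [if_neg (by simpa using hx)]
      simp only [List.map_cons, List.sum_cons]
      rw [ih (fun y hy hpy => h y (by simp [hy]) hpy), h x (by simp) (by simpa using hx), zero_add]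

theorem vals_sum (books : List (List (String × Int))) (w : String) :
    ((((PySem.List.enumerate books 0).filter (fun p => occB w p.2)).map (fun p => bSum w p.2)).sum)
      = bSum w books.flatten := by
  rw [sum_map_filter_eq _ _ _ (fun x _ hx => bSum_of_not_occ w x.2 hx)]
  rw [bSum_flatten]
  conv_rhs => rw [← PySem.List.map_snd_enumerate books 0]
  rw [List.map_map]
  rfl

theorem skipBD_contains (books : List (List (String × Int))) (w : String) :
    (skipBD books).contains w
      = books.any (fun occ => occB w occ && (bSum w occ == bSum w books.flatten)) := by
  apply Bool.eq_iff_iff.mpr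
  rw [List.contains_iff_mem, List.any_eq_true]
  rw [skipBD, PySem.Set.mem_ofList]
  have hvals : ((perWordD books).getD w PySem.Dict.empty).values
      = ((PySem.List.enumerate books 0).filter (fun p => occB w p.2)).map (fun p => bSum w p.2) := by
    show ((perWordD books).getD w PySem.Dict.empty).items.map (·.2) = _
    rw [perWordD_getD_items, List.map_map]
    rfl
  have hsum : ((perWordD books).getD w PySem.Dict.empty).values.sum = bSum w books.flatten := by
    rw [hvals, vals_sum]
  constructor
  · rintro hmem
    rw [List.mem_map] at hmem
    obtain ⟨⟨pk, pv⟩, hpr, hfst⟩ := hmem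
    rw [List.mem_filter] at hpr
    obtain ⟨hin, hcond⟩ := hpr
    have hget : (perWordD books).getD pk PySem.Dict.empty = pv :=
      PySem.Dict.getD_of_mem_items _ hin (perWordD_nodup_keys books) _
    simp only at hfst hcond
    rw [hfst] at hget
    have hsum' : pv.values.sum = bSum w books.flatten := by rw [← hget]; exact hsum
    rw [hsum', ← hget, hvals] at hcond
    rw [List.contains_iff_mem, List.mem_map] at hcond
    obtain ⟨q, hq, hbq⟩ := hcond
    rw [List.mem_filter] at hq
    obtain ⟨hqe, hqocc⟩ := hq
    rw [PySem.List.mem_enumerate_iff] at hqe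
    obtain ⟨k, hk, rfl⟩ := hqe
    exact ⟨books[k], by simp, by simp at hqocc ⊢; exact ⟨hqocc, by simpa using hbq⟩⟩
  · rintro ⟨occ, hocc, hcond⟩
    rw [Bool.and_eq_true, beq_iff_eq] at hcond
    obtain ⟨hoccB, hbs⟩ := hcond
    obtain ⟨k, hk, rfl⟩ := List.mem_iff_getElem.mp hocc
    have hq : ((0 + (k : Int)), books[k]) ∈ PySem.List.enumerate books 0 :=
      (PySem.List.mem_enumerate_iff books 0 _).mpr ⟨k, hk, rfl⟩
    -- w is a key of perWordD
    have hkey : w ∈ (perWordD books).keys := by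
      rw [← PySem.Dict.contains_iff_mem_keys, perWordD_contains, List.any_eq_true]
      exact ⟨books[k], hocc, hoccB⟩
    have hd : ((k : Int), bSum w books[k]) ∈ ((perWordD books).getD w PySem.Dict.empty).items := by
      rw [perWordD_getD_items, List.mem_map]
      refine ⟨((0 + (k : Int)), books[k]), ?_, by simp⟩
      rw [List.mem_filter]
      exact ⟨hq, hoccB⟩
    have hcondw : (((perWordD books).getD w PySem.Dict.empty).values.contains
        ((perWordD books).getD w PySem.Dict.empty).values.sum) = true := by
      rw [hsum, List.contains_iff_mem, ← hbs]
      show bSum w books[k] ∈ ((perWordD books).getD w PySem.Dict.empty).items.map (·.2)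
      exact List.mem_map.mpr ⟨_, hd, rfl⟩
    rw [List.mem_map]
    refine ⟨(w, (perWordD books).getD w PySem.Dict.empty), ?_, rfl⟩
    rw [List.mem_filter]
    constructor
    · rw [PySem.Dict.items_eq_map_keys _ (perWordD_nodup_keys books) PySem.Dict.empty, List.mem_map]
      exact ⟨w, hkey, rfl⟩
    · exact hcondw

theorem A_unfold (books : List (List (String × Int))) :
    filter_out_words_in_single_book books
      = books.map (fun occ =>
          occ.foldl (fun result word =>
            if !((skipAD books).contains word.1) then result ++ [word] else result) []) := rfl

theorem B_unfold (books : List (List (String × Int))) :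
    filter_out_words_in_single_book_alt books
      = books.map (fun book => book.filter (fun e => !((skipBD books).contains e.1))) := rfl

theorem main_thm (books : List (List (String × Int))) :
    filter_out_words_in_single_book books = filter_out_words_in_single_book_alt books := by
  rw [A_unfold, B_unfold]
  apply List.map_congr_left
  intro occ _
  rw [PySem.List.foldl_append_if_eq_filter (fun word => !((skipAD books).contains word.1)) occ []]
  rw [List.nil_append]
  apply List.filter_congr
  intro e _
  rw [skipAD_contains, skipBD_contains]

-- ===== VERDICT (by name: the statement is the Claim_ definition above) =====
theorem filter_out_words_in_single_book_spec : Claim_equal_filter_out_words_in_single_book := by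
  intro books _
  unfold Spec_filter_out_words_in_single_book
  exact main_thm books
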